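-- pv_equiv track=rewrite | github.com/luke-a-thompson/Stochastax | stochastax/hopf_algebras/hopf_algebras.py | _levelseq_to_parent
-- ===== SOURCE A (Python) =====
-- def _levelseq_to_parent(levels: list[int]) -> list[int]:
--     n = len(levels)
--     parent_py: list[int] = [-1] * n
--     stack: list[int] = []
--     for i in range(n):
--         d = levels[i]
--         while len(stack) >= d:
--             stack.pop()
--         if stack:
--             parent_py[i] = stack[-1]
--         stack.append(i)
--     return parent_py
-- ===== SOURCE B (Python) =====
-- def _levelseq_to_parent(levels: list[int]) -> list[int]:
--     n = len(levels)
--     parent: list[int] = [-1] * n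
--     last_at: list[int] = [0] * n  # last_at[k] = most recent index at effective depth k
--     slen = 0  # effective stack depth
--     for i, d in enumerate(levels):
--         pos = max(0, min(slen, d - 1))
--         if pos > 0:
--             parent[i] = last_at[pos - 1]
--         last_at[pos] = i
--         slen = pos + 1
--     return parent
-- ===== Notes on version B (the rewrite author's own statement) =====
-- stated objective: alternative
-- what changed: Replaces the explicit stack with its pop/append inner while-loop by a depth-indexed table last_at and a tracked effective depth, so each element is processed with O(1) arithmetic and one table lookup instead of repeated pops.
import Mathlib
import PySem

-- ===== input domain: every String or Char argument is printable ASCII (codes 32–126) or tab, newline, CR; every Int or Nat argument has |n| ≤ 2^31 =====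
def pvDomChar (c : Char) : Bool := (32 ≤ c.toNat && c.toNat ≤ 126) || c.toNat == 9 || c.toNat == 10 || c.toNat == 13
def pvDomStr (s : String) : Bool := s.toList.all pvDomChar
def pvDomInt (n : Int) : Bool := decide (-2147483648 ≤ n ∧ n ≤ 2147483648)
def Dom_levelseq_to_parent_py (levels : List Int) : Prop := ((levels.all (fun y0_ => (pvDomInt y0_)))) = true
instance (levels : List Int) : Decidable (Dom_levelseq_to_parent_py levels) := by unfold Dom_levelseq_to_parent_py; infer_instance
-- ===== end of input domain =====

-- B replaces A's explicit stack (with its inner pop loop) by a depth-indexed table `last_at`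
-- plus a tracked effective depth — an alternative, stack-free decomposition of the same result.
-- Pre_ excludes inputs with a level ≤ 0, on which A raises IndexError (pop from an empty list).

-- ===== PORT A =====
-- the inner `while len(stack) >= d: stack.pop()` (stack top at head; on excluded inputs
-- where Python pops an empty list and raises, this totalization returns [])
def pvPopA (d : Int) : List Int → List Int
  | [] => []
  | x :: s => if d ≤ ((x :: s).length : Int) then pvPopA d s else x :: s

-- one iteration of A's `for i in range(n)` body; state = (parent_py, stack)
def pvStepA (levels : List Int) (st : List Int × List Int) (i : Nat) : List Int × List Int :=
  let d := levels.getD i 0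
  let stack := pvPopA d st.2
  let parent := match stack with
    | [] => st.1
    | top :: _ => st.1.set i top
  (parent, (i : Int) :: stack)

def levelseq_to_parent_py (levels : List Int) : List Int :=
  let n := levels.length
  ((List.range n).foldl (pvStepA levels) (List.replicate n (-1), [])).1

-- ===== PORT B =====
-- one iteration of B's loop; state = (parent, last_at, slen)
def pvStepB (levels : List Int) (st : List Int × List Int × Nat) (i : Nat) : List Int × List Int × Nat :=
  let d := levels.getD i 0
  let pos : Int := max 0 (min ((st.2.2 : Int)) (d - 1))
  let parent := if 0 < pos then st.1.set i (st.2.1.getD (pos - 1).toNat 0) else st.1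
  (parent, st.2.1.set pos.toNat (i : Int), pos.toNat + 1)

def levelseq_to_parent_py_alt (levels : List Int) : List Int :=
  let n := levels.length
  ((List.range n).foldl (pvStepB levels) (List.replicate n (-1), List.replicate n 0, 0)).1

-- ===== PRECONDITION & SPEC =====
-- exactly the inputs on which A returns: A raises IndexError as soon as some level ≤ 0
def Pre_levelseq_to_parent_py (levels : List Int) : Prop := (levels.all (fun d => 1 ≤ d)) = true
instance (levels : List Int) : Decidable (Pre_levelseq_to_parent_py levels) := by unfold Pre_levelseq_to_parent_py; infer_instance

def pvWitness_levelseq_to_parent_py : List Int := [1, 2, 3, 2, 2, 1, 2]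

def Spec_levelseq_to_parent_py (levels : List Int) (out : List Int) : Prop := out = levelseq_to_parent_py_alt levels
instance (levels : List Int) (out : List Int) : Decidable (Spec_levelseq_to_parent_py levels out) := by unfold Spec_levelseq_to_parent_py; infer_instance

-- ===== CLAIM (what is proved, stated in full; the proofs are below) =====
def Claim_equal_levelseq_to_parent_py : Prop := ∀ (levels : List Int), Dom_levelseq_to_parent_py levels → Pre_levelseq_to_parent_py levels → Spec_levelseq_to_parent_py levels (levelseq_to_parent_py levels)


-- ===== LEMMAS AND PROOFS =====

-- A's pop loop is a `drop` down to the clamped target length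
lemma pvPopA_eq (d : Int) (s : List Int) :
    pvPopA d s = s.drop (s.length - (min ((s.length : Int)) (d - 1)).toNat) := by
  induction s with
  | nil => simp [pvPopA]
  | cons x s ih =>
    simp only [pvPopA]
    by_cases h : d ≤ (((x :: s).length : Int))
    · rw [if_pos h, ih]
      have hx : (x :: s).length - (min (((x :: s).length : Int)) (d - 1)).toNat
          = (s.length - (min ((s.length : Int)) (d - 1)).toNat) + 1 := by
        simp only [List.length_cons] at h ⊢; omega
      rw [hx, List.drop_succ_cons]
    · rw [if_neg h]
      have hx : (x :: s).length - (min (((x :: s).length : Int)) (d - 1)).toNat = 0 := by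
        simp only [List.length_cons] at h ⊢; omega
      rw [hx, List.drop_zero]

-- the loop invariant: A's stack has length `slen` and, read bottom-up, is the prefix of B's table
lemma pv_main (levels : List Int) : ∀ (k j : Nat) (p la s : List Int),
    j + k ≤ levels.length → s.length ≤ j → la.length = levels.length →
    la.take s.length = s.reverse →
    ((List.range' j k).foldl (pvStepA levels) (p, s)).1 =
    ((List.range' j k).foldl (pvStepB levels) (p, la, s.length)).1 := by
  intro k
  induction k with
  | zero => intro j p la s _ _ _ _; rfl
  | succ k ih =>
    intro j p la s hjk hs hla hinv
    rw [List.range'_succ]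
    simp only [List.foldl_cons]
    set d := levels.getD j 0 with hd
    set m : Nat := (min ((s.length : Int)) (d - 1)).toNat with hmdef
    have hm : m ≤ s.length := by omega
    have hjn : j < levels.length := by omega
    have hstack : pvPopA d s = s.drop (s.length - m) := by rw [pvPopA_eq]
    have hlenst : (pvPopA d s).length = m := by rw [hstack]; simp; omega
    have hrev : (pvPopA d s).reverse = s.reverse.take m := by
      rw [hstack, List.reverse_drop]; congr 1; omega
    have htakem : la.take m = s.reverse.take m := by
      have h2 : la.take m = (la.take s.length).take m := by
        rw [List.take_take]; congr 1; omega
      rw [h2, hinv]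
    by_cases hm0 : m = 0
    · -- the pop loop emptied the stack: both sides leave parent unchanged
      have hnil : pvPopA d s = [] := by
        have h3 := hlenst; rw [hm0] at h3; exact List.eq_nil_of_length_eq_zero h3
      have hple : max 0 (min ((s.length : Int)) (d - 1)) = 0 := by omega
      have e1 : pvStepA levels (p, s) j = (p, [(j : Int)]) := by
        simp only [pvStepA]; rw [← hd, hnil]
      have e2 : pvStepB levels (p, la, s.length) j = (p, la.set 0 (j : Int), 1) := by
        simp only [pvStepB]; rw [← hd, hple]; simp
      rw [e1, e2]
      have h4 := ih (j + 1) p (la.set 0 (j : Int)) [(j : Int)] (by omega) (by simp)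
        (by simp [hla])
        (by cases la with
            | nil => simp at hla; omega
            | cons a t => simp)
      simpa using h4
    · -- stack nonempty after the pops: its top is B's last_at[pos-1]
      obtain ⟨top, rest, hcase⟩ : ∃ top rest, pvPopA d s = top :: rest := by
        cases hc : pvPopA d s with
        | nil => rw [hc] at hlenst; simp at hlenst; omega
        | cons a t => exact ⟨a, t, rfl⟩
      have hrest : rest.length = m - 1 := by rw [hcase] at hlenst; simp at hlenst; omega
      have h1 : la.take m = rest.reverse ++ [top] := by
        rw [htakem, ← hrev, hcase]; simp
      have htop : la.getD (m - 1) 0 = top := by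
        have h5 : la[m-1]? = (la.take m)[m-1]? := (List.getElem?_take_of_lt (by omega)).symm
        rw [List.getD_eq_getElem?_getD, h5, h1,
          show m - 1 = rest.reverse.length by simp [hrest],
          List.getElem?_concat_length]
        rfl
      have hpos : (0 : Int) < max 0 (min ((s.length : Int)) (d - 1)) := by omega
      have hposA : (max 0 (min ((s.length : Int)) (d - 1))).toNat = m := by omega
      have hpos1 : (max 0 (min ((s.length : Int)) (d - 1)) - 1).toNat = m - 1 := by omega
      have e1 : pvStepA levels (p, s) j = (p.set j top, (j : Int) :: top :: rest) := by
        simp only [pvStepA]; rw [← hd, hcase]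
      have e2 : pvStepB levels (p, la, s.length) j
          = (p.set j top, la.set m (j : Int), m + 1) := by
        simp only [pvStepB]; rw [← hd, if_pos hpos, hposA, hpos1, htop]
      have hmn : m < la.length := by omega
      have hinv' : (la.set m (j : Int)).take (m + 1) = ((j : Int) :: top :: rest).reverse := by
        rw [List.set_eq_take_cons_drop _ hmn,
          show m + 1 = (la.take m).length + 1 by simp; omega,
          List.take_append]
        simp only [h1]
        rw [List.take_of_length_le (by simp)]
        simp
      have hlen3 : ((j : Int) :: top :: rest).length = m + 1 := by simp; omega
      rw [e1, e2, ← hlen3]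
      exact ih (j + 1) (p.set j top) (la.set m (j : Int)) ((j : Int) :: top :: rest)
        (by omega) (by simp; omega) (by simp [hla]) (by rw [hlen3]; exact hinv')

theorem levelseq_to_parent_py_spec : Claim_equal_levelseq_to_parent_py := by
  intro levels _ _
  unfold Spec_levelseq_to_parent_py levelseq_to_parent_py levelseq_to_parent_py_alt
  simp only [List.range_eq_range']
  exact pv_main levels levels.length 0 _ _ [] (by omega) (by simp) (by simp) (by simp)
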